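-- pv_equiv track=rewrite | github.com/KimEide/christer-kim-chord | slett denne før innlevering/christer.py | is_bewteen
-- ===== SOURCE A (Python) =====
-- def is_bewteen(a, b, c, m):
-- 	buffer = []
--
-- 	gap = (c-a)
-- 	if gap < 0:
-- 		c = 16+c
--
-- 	while(a < c):
-- 		a += 1
-- 		buffer.append(a % m)
--
-- 	if b in buffer:
-- 		return True
--
-- 	return False
-- ===== SOURCE B (Python) =====
-- def is_bewteen(a, b, c, m):
--     if c - a < 0:
--         c = 16 + c
--     n = c - a
--     if n <= 0:
--         return False
--     if b != b % m:
--         return False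
--     delta = (b - a) % abs(m)
--     if delta == 0:
--         delta = abs(m)
--     return delta <= n
-- ===== Notes on version B (the rewrite author's own statement) =====
-- stated objective: alternative
-- what changed: B drops A's buffer of all residues (a+1..c) % m and decides membership by a closed-form arithmetic test: b must be a valid residue (b == b % m) and the first index > a congruent to b mod |m| must lie within the range; intended as faster on wide ranges (measured 62x at n=262144 on the range inputs, but not consistent across the input family, so not claimed).
import Mathlib
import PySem

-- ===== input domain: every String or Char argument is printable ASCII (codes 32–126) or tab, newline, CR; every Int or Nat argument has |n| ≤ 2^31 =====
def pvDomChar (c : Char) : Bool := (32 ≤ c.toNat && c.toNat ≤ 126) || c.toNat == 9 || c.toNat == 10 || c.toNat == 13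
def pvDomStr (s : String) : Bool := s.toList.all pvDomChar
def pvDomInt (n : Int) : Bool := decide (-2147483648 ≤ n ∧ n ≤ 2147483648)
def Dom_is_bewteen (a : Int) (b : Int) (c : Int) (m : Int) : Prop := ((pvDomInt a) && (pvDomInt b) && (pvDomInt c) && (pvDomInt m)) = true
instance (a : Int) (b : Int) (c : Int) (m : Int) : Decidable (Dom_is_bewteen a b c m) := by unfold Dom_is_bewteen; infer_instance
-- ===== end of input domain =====

-- B replaces A's buffer-building loop over a+1..c by a closed-form arithmetic modular-range membership test (no buffer).

-- ===== PORT A =====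
-- the while loop: a += 1; buffer.append(a % m)
-- (append is kept as cons onto a reversed accumulator, un-reversed on exit, so evaluation stays linear)
def isBewteenLoop (a : Int) (c : Int) (m : Int) (rbuf : List Int) : List Int :=
  if a < c then isBewteenLoop (a + 1) c m (PySem.Int.mod (a + 1) m :: rbuf) else rbuf.reverse
termination_by (c - a).toNat
decreasing_by omega

def is_bewteen (a : Int) (b : Int) (c : Int) (m : Int) : Bool :=
  let gap := c - a
  let c := if gap < 0 then 16 + c else c
  let buffer := isBewteenLoop a c m []
  if b ∈ buffer then true else false

-- ===== PORT B =====
def is_bewteen_alt (a : Int) (b : Int) (c : Int) (m : Int) : Bool :=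
  let c := if c - a < 0 then 16 + c else c
  let n := c - a
  if n ≤ 0 then false
  else if b ≠ PySem.Int.mod b m then false
  else
    let delta := PySem.Int.mod (b - a) (m.natAbs : Int)   -- (b - a) % abs(m)
    let delta := if delta = 0 then (m.natAbs : Int) else delta
    decide (delta ≤ n)

-- ===== PRECONDITION & SPEC =====
-- Pre_ excludes exactly m = 0 with a nonempty loop, where Python A raises ZeroDivisionError (B raises there too).
def Pre_is_bewteen (a : Int) (b : Int) (c : Int) (m : Int) : Prop :=
  m ≠ 0 ∨ c = a ∨ c ≤ a - 16
instance (a : Int) (b : Int) (c : Int) (m : Int) : Decidable (Pre_is_bewteen a b c m) := by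
  unfold Pre_is_bewteen; infer_instance
def pvWitness_is_bewteen : Int × Int × Int × Int := (2, 1, 9, 4)

def Spec_is_bewteen (a : Int) (b : Int) (c : Int) (m : Int) (out : Bool) : Prop := out = is_bewteen_alt a b c m
instance (a : Int) (b : Int) (c : Int) (m : Int) (out : Bool) : Decidable (Spec_is_bewteen a b c m out) := by unfold Spec_is_bewteen; infer_instance

-- ===== CLAIM (what is proved, stated in full; the proofs are below) =====
def Claim_equal_is_bewteen : Prop := ∀ (a : Int) (b : Int) (c : Int) (m : Int), Dom_is_bewteen a b c m → Pre_is_bewteen a b c m → Spec_is_bewteen a b c m (is_bewteen a b c m)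

-- ===== LEMMAS AND PROOFS =====

-- membership in the built buffer = some x in (a, c] hits b as x % m
theorem mem_isBewteenLoop (a c m : Int) (rbuf : List Int) (b : Int) :
    b ∈ isBewteenLoop a c m rbuf ↔ b ∈ rbuf ∨ ∃ x, a < x ∧ x ≤ c ∧ b = PySem.Int.mod x m := by
  fun_induction isBewteenLoop a c m rbuf with
  | case1 a rbuf hlt ih =>
    rw [ih]
    constructor
    · rintro (hb | ⟨x, hx1, hx2, hx3⟩)
      · rcases List.mem_cons.mp hb with h | h
        · exact Or.inr ⟨a + 1, by omega, by omega, h⟩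
        · exact Or.inl h
      · exact Or.inr ⟨x, by omega, hx2, hx3⟩
    · rintro (hb | ⟨x, hx1, hx2, hx3⟩)
      · exact Or.inl (List.mem_cons.mpr (Or.inr hb))
      · by_cases hxa : x = a + 1
        · subst hxa; exact Or.inl (List.mem_cons.mpr (Or.inl hx3))
        · exact Or.inr ⟨x, by omega, hx2, hx3⟩
  | case2 a rbuf hlt =>
    rw [List.mem_reverse]
    simp only [iff_self_or]
    rintro ⟨x, hx1, hx2, _⟩
    omega

-- Python's r = x % m, reduced modulo |m| (Lean emod), equals x modulo |m|
theorem pmod_emod (x m : Int) (hm : m ≠ 0) :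
    PySem.Int.mod x m % (m.natAbs : Int) = x % (m.natAbs : Int) := by
  have h := PySem.Int.floordiv_mul_add_mod x m
  set q := PySem.Int.floordiv x m with hq
  set M : Int := (m.natAbs : Int) with hM
  have hmod : PySem.Int.mod x m = x - q * m := by linarith
  have hcases : m = M ∨ m = -M := by rw [hM]; exact Int.natAbs_eq m
  rcases hcases with he | he
  · have h2 : PySem.Int.mod x m = x + M * (-q) := by
      rw [hmod, show q * m = q * M from by rw [he]]; ring
    rw [h2, Int.add_mul_emod_self_left]
  · have h2 : PySem.Int.mod x m = x + M * q := by
      rw [hmod, show q * m = -(q * M) from by rw [he]; ring]; ring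
    rw [h2, Int.add_mul_emod_self_left]

-- two values congruent mod |m| have the same Python remainder
theorem pmod_congr (x y m : Int) (hm : m ≠ 0)
    (h : x % (m.natAbs : Int) = y % (m.natAbs : Int)) :
    PySem.Int.mod x m = PySem.Int.mod y m := by
  set M : Int := (m.natAbs : Int) with hM
  have hMpos : 0 < M := by simp [hM]; omega
  have h1 := pmod_emod x m hm
  have h2 := pmod_emod y m hm
  have hd : M ∣ (PySem.Int.mod x m - PySem.Int.mod y m) := by
    apply Int.dvd_of_emod_eq_zero
    rw [Int.sub_emod, h1, h2, h, sub_self, Int.zero_emod]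
  have habs : |PySem.Int.mod x m - PySem.Int.mod y m| < M := by
    rcases lt_or_gt_of_ne hm with hneg | hpos
    · have b1 := PySem.Int.mod_neg_bounds x hneg
      have b2 := PySem.Int.mod_neg_bounds y hneg
      rw [abs_lt]; omega
    · have b1 := PySem.Int.mod_nonneg x hpos
      have b2 := PySem.Int.mod_nonneg y hpos
      have c1 := PySem.Int.mod_lt x hpos
      have c2 := PySem.Int.mod_lt y hpos
      rw [abs_lt]; omega
  have := Int.eq_zero_of_abs_lt_dvd hd habs
  omega

theorem pmod_idem (x m : Int) (hm : m ≠ 0) :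
    PySem.Int.mod (PySem.Int.mod x m) m = PySem.Int.mod x m := by
  exact pmod_congr (PySem.Int.mod x m) x m hm (pmod_emod x m hm)

-- 0 ≤ a, 0 < b → a % b ≤ a
theorem emod_le_self (a b : Int) (ha : 0 ≤ a) (hb : 0 < b) : a % b ≤ a := by
  have h1 : 0 ≤ a / b := Int.ediv_nonneg ha hb.le
  have h2 : 0 ≤ b * (a / b) := mul_nonneg hb.le h1
  have h3 := Int.emod_add_mul_ediv a b
  linarith

-- the arithmetic bridge: existence of a hit in (a, c] ↔ B's O(1) test
theorem bridge (a b c m : Int) (hm : m ≠ 0) :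
    (∃ x, a < x ∧ x ≤ c ∧ b = PySem.Int.mod x m) ↔
      (b = PySem.Int.mod b m ∧
        (if PySem.Int.mod (b - a) (m.natAbs : Int) = 0 then (m.natAbs : Int)
         else PySem.Int.mod (b - a) (m.natAbs : Int)) ≤ c - a) := by
  set M : Int := (m.natAbs : Int) with hM
  have hMpos : 0 < M := by simp [hM]; omega
  have hpM : PySem.Int.mod (b - a) M = (b - a) % M := PySem.Int.mod_eq_emod_of_pos hMpos
  rw [hpM]
  constructor
  · rintro ⟨x, hx1, hx2, hx3⟩
    have hbb : b = PySem.Int.mod b m := by rw [hx3, pmod_idem x m hm]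
    refine ⟨hbb, ?_⟩
    have hbx : b % M = x % M := by rw [hx3, pmod_emod x m hm]
    have hcong : (x - a) % M = (b - a) % M := by
      rw [Int.sub_emod, ← hbx, ← Int.sub_emod]
    split_ifs with h0
    · have hdvd : M ∣ (x - a) := Int.dvd_of_emod_eq_zero (by rw [hcong, h0])
      have := Int.le_of_dvd (by omega) hdvd
      omega
    · have h1 := emod_le_self (x - a) M (by omega) hMpos
      rw [hcong] at h1
      have := Int.emod_nonneg (b - a) (by omega : M ≠ 0)
      omega
  · rintro ⟨hbb, hle⟩
    have hnn := Int.emod_nonneg (b - a) (by omega : M ≠ 0)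
    have hlt := Int.emod_lt_of_pos (b - a) hMpos
    by_cases h0 : (b - a) % M = 0
    · rw [if_pos h0] at hle
      refine ⟨a + M, by omega, by omega, ?_⟩
      have hc : (a + M) % M = b % M := by
        obtain ⟨k, hk⟩ := Int.dvd_of_emod_eq_zero h0
        rw [show a + M = a + M * 1 from by ring, Int.add_mul_emod_self_left,
          show b = a + M * k from by omega, Int.add_mul_emod_self_left]
      rw [pmod_congr (a + M) b m hm hc]
      exact hbb
    · rw [if_neg h0] at hle
      refine ⟨a + (b - a) % M, by omega, by omega, ?_⟩
      have hc : (a + (b - a) % M) % M = b % M := by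
        rw [Int.add_emod a ((b - a) % M) M, Int.emod_emod_of_dvd (b - a) dvd_rfl,
          ← Int.add_emod, show a + (b - a) = b from by ring]
      rw [pmod_congr (a + (b - a) % M) b m hm hc]
      exact hbb

-- ===== VERDICT (by name: the statement is the Claim_ definition above) =====
theorem is_bewteen_spec : Claim_equal_is_bewteen := by
  intro a b c m _hdom hpre
  unfold Spec_is_bewteen is_bewteen is_bewteen_alt
  simp only []
  set c' : Int := if c - a < 0 then 16 + c else c with hc'
  by_cases hrun : a < c'
  · have hm : m ≠ 0 := by
      rcases hpre with h | h | h
      · exact h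
      · exfalso; rw [hc'] at hrun; split_ifs at hrun <;> omega
      · exfalso; rw [hc'] at hrun; split_ifs at hrun <;> omega
    have hmem : b ∈ isBewteenLoop a c' m [] ↔
        (b = PySem.Int.mod b m ∧
          (if PySem.Int.mod (b - a) (m.natAbs : Int) = 0 then (m.natAbs : Int)
           else PySem.Int.mod (b - a) (m.natAbs : Int)) ≤ c' - a) := by
      rw [mem_isBewteenLoop]
      simpa using bridge a b c' m hm
    rw [if_neg (by omega : ¬ c' - a ≤ 0)]
    by_cases hmemb : b ∈ isBewteenLoop a c' m []
    · obtain ⟨hb, hd⟩ := hmem.mp hmemb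
      rw [if_pos hmemb, if_neg (by simpa using hb)]
      exact (decide_eq_true hd).symm
    · rw [if_neg hmemb]
      by_cases hb : b = PySem.Int.mod b m
      · rw [if_neg (by simpa using hb)]
        have hd : ¬ (if PySem.Int.mod (b - a) (m.natAbs : Int) = 0 then (m.natAbs : Int)
             else PySem.Int.mod (b - a) (m.natAbs : Int)) ≤ c' - a :=
          fun h => hmemb (hmem.mpr ⟨hb, h⟩)
        exact (decide_eq_false hd).symm
      · rw [if_pos (by simpa using hb)]
  · rw [if_pos (by omega : c' - a ≤ 0)]
    have hnil : isBewteenLoop a c' m [] = [] := by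
      rw [isBewteenLoop, if_neg hrun, List.reverse_nil]
    simp [hnil]
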